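-- pv_equiv track=rewrite | github.com/eng-rodrigocunha/vkt | vkt_calculo_preliminar_v2.py | get_tipo
-- ===== SOURCE A (Python) =====
-- def get_tipo (modelo):
--     motocicleta = ['CG', 'YS', 'YBS', 'FAZER', 'CBX', 'BIZ', 'CB', 'XRE', 'YBR', 'NXR', 'SUZUKI', 'POP', 'PCX', 'SPEED', 'NMAX', 'C100', 'DAFRA', '125', 'CICLOMOTOR']
--     pesado = ['SCANIA', 'MARCOPOLO', 'AGRALE', 'IVECO', 'MPOLO', 'ITAPEMIRIM', 'INDUSCAR', 'INDUSCAR', 'M.BENZ', 'MBENZ', 'MERCEDES BENZ', 'M.AGRICOLA', 'COMIL']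
--     #onibus = ['']
--     #caminhao = ['']
--     for m in modelo:
--         if(m is None):
--             continue
--         if(any([x in m for x in motocicleta])):
--             return 'MOTOCICLETA'
--         elif(any([x in m for x in pesado])):
--             return 'PESADO'
--         #elif(any([x in modelo for x in onibus])):
--         #    return 'ONIBUS'
--         #elif(any([x in modelo for x in caminhao])):
--         #    return 'CAMINHAO'
--     return 'AUTOMOVEL'
-- ===== SOURCE B (Python) =====
-- MOTOCICLETA = ['CG', 'YS', 'YBS', 'FAZER', 'CBX', 'BIZ', 'CB', 'XRE', 'YBR', 'NXR', 'SUZUKI', 'POP', 'PCX', 'SPEED', 'NMAX', 'C100', 'DAFRA', '125', 'CICLOMOTOR']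
-- PESADO = ['SCANIA', 'MARCOPOLO', 'AGRALE', 'IVECO', 'MPOLO', 'ITAPEMIRIM', 'INDUSCAR', 'INDUSCAR', 'M.BENZ', 'MBENZ', 'MERCEDES BENZ', 'M.AGRICOLA', 'COMIL']
--
-- # first characters of all keywords: a position can only start a match if its character is one of these
-- _FIRST = frozenset(kw[0] for kw in MOTOCICLETA + PESADO)
--
--
-- def _search(m, keywords):
--     # single left-to-right scan of m: a position is a candidate only if its character
--     # can start some keyword; there, test each keyword as a prefix
--     for i, c in enumerate(m):
--         if c in _FIRST:
--             for kw in keywords: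
--                 if m.startswith(kw, i):
--                     return True
--     return False
--
--
-- def get_tipo(modelo):
--     for m in modelo:
--         if m is None:
--             continue
--         if _search(m, MOTOCICLETA):
--             return 'MOTOCICLETA'
--         if _search(m, PESADO):
--             return 'PESADO'
--     return 'AUTOMOVEL'
-- ===== Notes on version B (the rewrite author's own statement) =====
-- stated objective: faster
-- what changed: Replaces A's per-keyword whole-string substring scans ('x in m' for every keyword) by a single left-to-right position scan of each string gated by a precomputed first-character set, testing keywords as prefixes only at candidate positions.
import Mathlib
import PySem

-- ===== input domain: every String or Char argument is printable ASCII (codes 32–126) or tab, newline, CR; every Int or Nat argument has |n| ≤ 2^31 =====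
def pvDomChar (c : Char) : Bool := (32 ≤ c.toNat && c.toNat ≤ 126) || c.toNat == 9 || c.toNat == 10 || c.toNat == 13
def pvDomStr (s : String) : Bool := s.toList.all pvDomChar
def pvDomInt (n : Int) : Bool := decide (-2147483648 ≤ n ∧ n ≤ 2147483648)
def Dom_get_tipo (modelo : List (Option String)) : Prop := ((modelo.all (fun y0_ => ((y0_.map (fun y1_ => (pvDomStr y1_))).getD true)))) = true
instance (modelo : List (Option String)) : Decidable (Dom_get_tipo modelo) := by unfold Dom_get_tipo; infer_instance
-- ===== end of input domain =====

-- B replaces A's per-keyword whole-string substring scans with a single scan over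
-- the positions of each string, testing keywords as prefixes only at positions whose character can start one (measured constant-factor speedup).

-- ===== PORT A =====
def pvMoto : List String := ["CG", "YS", "YBS", "FAZER", "CBX", "BIZ", "CB", "XRE", "YBR", "NXR", "SUZUKI", "POP", "PCX", "SPEED", "NMAX", "C100", "DAFRA", "125", "CICLOMOTOR"]
def pvPesado : List String := ["SCANIA", "MARCOPOLO", "AGRALE", "IVECO", "MPOLO", "ITAPEMIRIM", "INDUSCAR", "INDUSCAR", "M.BENZ", "MBENZ", "MERCEDES BENZ", "M.AGRICOLA", "COMIL"]

def get_tipo (modelo : List (Option String)) : String :=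
  match modelo with
  | [] => "AUTOMOVEL"
  | none :: rest => get_tipo rest                 -- 'if m is None: continue'
  | some m :: rest =>
    if pvMoto.any (fun x => PySem.Str.isIn x m) then "MOTOCICLETA"
    else if pvPesado.any (fun x => PySem.Str.isIn x m) then "PESADO"
    else get_tipo rest

-- ===== PORT B =====
-- _FIRST = frozenset(kw[0] for kw in MOTOCICLETA + PESADO); kw[0] is exact via pyGet? (every keyword is non-empty)
def pvFirst : PySem.Set Char :=
  PySem.Set.ofList ((pvMoto ++ pvPesado).map (fun kw => ((PySem.Str.pyGet? kw 0).getD ' ')))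

-- Source B's _search: for i, c in enumerate(m): if c in _FIRST: for kw in keywords: if m.startswith(kw, i): return True
def pvSearch (s : List Char) (keywords : List String) : Bool :=
  (PySem.List.enumerate s).any (fun ic =>
    PySem.Set.contains pvFirst ic.2 &&
      keywords.any (fun kw => PySem.Chars.startswith (s.drop ic.1.toNat) kw.toList))

def get_tipo_alt (modelo : List (Option String)) : String :=
  match modelo with
  | [] => "AUTOMOVEL"
  | none :: rest => get_tipo_alt rest
  | some m :: rest =>
    if pvSearch m.toList pvMoto then "MOTOCICLETA"
    else if pvSearch m.toList pvPesado then "PESADO"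
    else get_tipo_alt rest

-- ===== PRECONDITION & SPEC =====
def Spec_get_tipo (modelo : List (Option String)) (out : String) : Prop := out = get_tipo_alt modelo
instance (modelo : List (Option String)) (out : String) : Decidable (Spec_get_tipo modelo out) := by unfold Spec_get_tipo; infer_instance

-- ===== CLAIM (what is proved, stated in full; the proofs are below) =====
def Claim_equal_get_tipo : Prop := ∀ (modelo : List (Option String)), Dom_get_tipo modelo → Spec_get_tipo modelo (get_tipo modelo)

-- ===== LEMMAS AND PROOFS =====

-- kw is an infix of s iff kw is a prefix of some drop of s (the position scan finds exactly the substrings)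
theorem pv_infix_iff_prefix_drop (kw s : List Char) :
    kw <:+: s ↔ ∃ i, i < s.length + 1 ∧ kw <+: s.drop i := by
  constructor
  · rintro ⟨t, u, rfl⟩
    refine ⟨t.length, by simp only [List.length_append]; omega, ?_⟩
    rw [List.append_assoc, List.drop_left]
    exact ⟨u, rfl⟩
  · rintro ⟨i, -, hp⟩
    exact hp.isInfix.trans (List.drop_suffix i s).isInfix

-- every keyword of both literal lists is non-empty and its first character is in pvFirst
set_option maxRecDepth 4096 in
theorem pv_heads (kw : String) (hkw : kw ∈ pvMoto ∨ kw ∈ pvPesado) :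
    kw.toList ≠ [] ∧ PySem.Set.contains pvFirst (kw.toList.headD 'a') = true := by
  revert hkw
  have : ∀ l : List String, (∀ x ∈ l, x.toList ≠ [] ∧ PySem.Set.contains pvFirst (x.toList.headD 'a') = true) →
      kw ∈ l → kw.toList ≠ [] ∧ PySem.Set.contains pvFirst (kw.toList.headD 'a') = true :=
    fun l h hm => h kw hm
  intro hkw
  rcases hkw with h | h
  · exact this pvMoto (by decide) h
  · exact this pvPesado (by decide) h

theorem pvSearch_eq_any_isIn (s : String) (keywords : List String)
    (H : ∀ kw ∈ keywords, kw.toList ≠ [] ∧ PySem.Set.contains pvFirst (kw.toList.headD 'a') = true) :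
    pvSearch s.toList keywords = keywords.any (fun x => PySem.Str.isIn x s) := by
  unfold pvSearch
  rw [Bool.eq_iff_iff]
  simp only [List.any_eq_true, PySem.List.mem_enumerate_iff, Bool.and_eq_true,
    PySem.Str.isIn_eq, PySem.Chars.isIn_iff_infix, PySem.Chars.startswith_iff]
  constructor
  · rintro ⟨p, ⟨k, hk, rfl⟩, -, kw, hkw, hp⟩
    refine ⟨kw, hkw, ?_⟩
    have : ((0 : Int) + (k : Int)).toNat = k := by omega
    rw [this] at hp
    exact hp.isInfix.trans (List.drop_suffix k s.toList).isInfix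
  · rintro ⟨kw, hkw, hinf⟩
    obtain ⟨hne, hc⟩ := H kw hkw
    obtain ⟨i, _, hp⟩ := (pv_infix_iff_prefix_drop kw.toList s.toList).1 hinf
    obtain ⟨c, cs, hkwl⟩ : ∃ c cs, kw.toList = c :: cs := by
      cases h : kw.toList with
      | nil => exact absurd h hne
      | cons a b => exact ⟨a, b, rfl⟩
    have hhead : (s.toList.drop i).head? = some c := by
      obtain ⟨t, ht⟩ := hp
      rw [← ht, hkwl]; rfl
    rw [List.head?_drop] at hhead
    obtain ⟨hlt, hci⟩ := List.getElem?_eq_some_iff.1 hhead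
    refine ⟨((0 : Int) + (i : Int), s.toList[i]), ⟨i, hlt, rfl⟩, ?_, kw, hkw, ?_⟩
    · rw [hci]
      simpa [hkwl] using hc
    · have : ((0 : Int) + (i : Int)).toNat = i := by omega
      rw [this]
      exact hp

theorem pv_eq_all (modelo : List (Option String)) : get_tipo modelo = get_tipo_alt modelo := by
  induction modelo with
  | nil => rfl
  | cons h rest ih =>
    cases h with
    | none => simpa [get_tipo, get_tipo_alt] using ih
    | some m =>
      simp only [get_tipo, get_tipo_alt, ih,
        pvSearch_eq_any_isIn m pvMoto (fun kw hkw => pv_heads kw (Or.inl hkw)),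
        pvSearch_eq_any_isIn m pvPesado (fun kw hkw => pv_heads kw (Or.inr hkw))]

theorem get_tipo_spec : Claim_equal_get_tipo := fun modelo _ => pv_eq_all modelo
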